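-- pv_equiv track=rewrite | github.com/lifemapper/lmtrex | lmtrex/frontend/response_to_table.py | get_response_keys
-- ===== SOURCE A (Python) =====
-- from itertools import combinations
--
-- def flatten_array(array):
--     return [item for sublist in array for item in sublist]
--
-- fields_to_exclude = [
--     'internal:service',
--     'internal:provider',
--     's2n:view_url',
--     's2n:api_url',
--     's2n:issues',
--     's2n:gbif_occurrence_url',
--     'dcterms:type',
--     'dwc:taxonRank',
--     'dcterms:language',
--     'dwc:scientificNameAuthorship',
--     's2n:worms_isMarine',
--     's2n:worms_isBrackish',
--     's2n:worms_isFreshwater',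
--     's2n:worms_isTerrestrial',
--     's2n:worms_isExtinct',
--     's2n:kingdom',
--     'dwc:kingdom',
--     'dwc:phylum',
--     'dwc:class',
--     'dwc:order',
--     'dwc:associatedReferences',
--     'dwc:associatedSequences',
--     'dcterms:accessRights',
--     'dcterms:license',
--     'dwc:countryCode',
-- ]
--
-- def unique_keys(array):
--     seen = set()
--     return [x for x in array if not (x in seen or seen.add(x))]
--
-- def get_response_keys(responses):
--     keys = [set(response.keys()) for response in responses]
--     common_keys = set(flatten_array([a & b for a, b in combinations(keys, 2)]))
--     all_keys = [
--         *flatten_array([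
--             [
--                 key
--                 for key in response.keys()
--                 if key in common_keys
--             ] for response in responses
--         ]),
--         *flatten_array([
--             [
--                 key
--                 for key in response.keys()
--                 if key not in common_keys
--             ] for response in responses
--         ])
--     ]
--     return [
--         key for key in unique_keys(all_keys) if key not in fields_to_exclude
--     ]
-- ===== SOURCE B (Python) =====
-- fields_to_exclude = [
--     'internal:service',
--     'internal:provider',
--     's2n:view_url',
--     's2n:api_url',
--     's2n:issues',
--     's2n:gbif_occurrence_url',
--     'dcterms:type',
--     'dwc:taxonRank',
--     'dcterms:language',
--     'dwc:scientificNameAuthorship',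
--     's2n:worms_isMarine',
--     's2n:worms_isBrackish',
--     's2n:worms_isFreshwater',
--     's2n:worms_isTerrestrial',
--     's2n:worms_isExtinct',
--     's2n:kingdom',
--     'dwc:kingdom',
--     'dwc:phylum',
--     'dwc:class',
--     'dwc:order',
--     'dwc:associatedReferences',
--     'dwc:associatedSequences',
--     'dcterms:accessRights',
--     'dcterms:license',
--     'dwc:countryCode',
-- ]
--
-- def get_response_keys(responses):
--     counts = {}
--     for response in responses:
--         for key in response.keys():
--             counts[key] = counts.get(key, 0) + 1
--     seen = set()
--     result = []
--     for response in responses: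
--         for key in response.keys():
--             if counts[key] >= 2 and key not in seen:
--                 seen.add(key)
--                 result.append(key)
--     for response in responses:
--         for key in response.keys():
--             if counts[key] < 2 and key not in seen:
--                 seen.add(key)
--                 result.append(key)
--     return [key for key in result if key not in fields_to_exclude]
-- ===== Notes on version B (the rewrite author's own statement) =====
-- stated objective: faster
-- what changed: Replaces A's pairwise intersection of all response key-set pairs (itertools.combinations) and per-response filtering passes by a single occurrence counter (a key is common iff its count across responses is >= 2) and one dedup-as-you-go two-phase scan.
import Mathlib
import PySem

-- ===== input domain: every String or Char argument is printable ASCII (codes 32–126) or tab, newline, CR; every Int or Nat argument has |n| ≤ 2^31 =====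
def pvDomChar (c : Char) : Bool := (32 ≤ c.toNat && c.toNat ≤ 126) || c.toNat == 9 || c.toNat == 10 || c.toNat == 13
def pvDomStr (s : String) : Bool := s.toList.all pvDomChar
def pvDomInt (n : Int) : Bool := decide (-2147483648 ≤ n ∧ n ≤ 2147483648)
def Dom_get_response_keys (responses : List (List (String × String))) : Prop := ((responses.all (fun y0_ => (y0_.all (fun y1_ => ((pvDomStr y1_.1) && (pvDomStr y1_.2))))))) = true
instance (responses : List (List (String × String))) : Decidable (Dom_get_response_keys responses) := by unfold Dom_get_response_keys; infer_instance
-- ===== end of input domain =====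

-- B replaces A's quadratic pairwise set intersections by a single occurrence count
-- (a key is "common" iff it occurs in at least 2 responses): alternative one-pass
-- algorithm, asymptotically fewer set operations; same return value everywhere.

-- shared dict primitive: response.keys() = the distinct keys, first-occurrence order
def pvRespKeys (r : List (String × String)) : List String :=
  PySem.Set.ofList (r.map Prod.fst)

-- module constant fields_to_exclude (same in Source A and Source B)
def pvFieldsToExclude : List String := [
  "internal:service", "internal:provider", "s2n:view_url", "s2n:api_url",
  "s2n:issues", "s2n:gbif_occurrence_url", "dcterms:type", "dwc:taxonRank",
  "dcterms:language", "dwc:scientificNameAuthorship", "s2n:worms_isMarine",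
  "s2n:worms_isBrackish", "s2n:worms_isFreshwater", "s2n:worms_isTerrestrial",
  "s2n:worms_isExtinct", "s2n:kingdom", "dwc:kingdom", "dwc:phylum",
  "dwc:class", "dwc:order", "dwc:associatedReferences", "dwc:associatedSequences",
  "dcterms:accessRights", "dcterms:license", "dwc:countryCode"]

-- ===== PORT A =====

-- flatten_array(array)
def pvFlattenArray (array : List (List String)) : List String := array.flatten

-- combinations(keys, 2) from itertools: all pairs (i < j) in order
def pvCombos2 : List (PySem.Set String) → List (PySem.Set String × PySem.Set String)
  | [] => []
  | x :: xs => xs.map (fun y => (x, y)) ++ pvCombos2 xs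

-- unique_keys(array): the comprehension with its 'seen' set, first occurrences kept
def pvUniqueKeysLoop (seen : PySem.Set String) : List String → List String
  | [] => []
  | x :: rest =>
      if PySem.Set.contains seen x then pvUniqueKeysLoop seen rest
      else x :: pvUniqueKeysLoop (PySem.Set.add seen x) rest

def pvUniqueKeys (array : List String) : List String :=
  pvUniqueKeysLoop PySem.Set.empty array

def get_response_keys (responses : List (List (String × String))) : List String :=
  let keys := responses.map (fun response => PySem.Set.ofList (pvRespKeys response))
  let common_keys := PySem.Set.ofList (pvFlattenArray
    ((pvCombos2 keys).map (fun p => PySem.Set.inter p.1 p.2)))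
  let all_keys :=
    pvFlattenArray (responses.map (fun response =>
      (pvRespKeys response).filter (fun key => PySem.Set.contains common_keys key)))
    ++ pvFlattenArray (responses.map (fun response =>
      (pvRespKeys response).filter (fun key => ! PySem.Set.contains common_keys key)))
  (pvUniqueKeys all_keys).filter (fun key => ! pvFieldsToExclude.contains key)

-- ===== PORT B =====

def get_response_keys_alt (responses : List (List (String × String))) : List String :=
  -- counts[key] = counts.get(key, 0) + 1 over every response's keys
  let counts := responses.foldl (fun d response =>
      (pvRespKeys response).foldl (fun d key => d.insert key (d.getD key 0 + 1)) d)
    (PySem.Dict.empty : PySem.Dict String Int)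
  -- first pass: keys occurring in >= 2 responses, in order, deduplicated via 'seen'
  let st1 := responses.foldl (fun st response =>
      (pvRespKeys response).foldl (fun (st : PySem.Set String × List String) key =>
        if decide (2 ≤ counts.getD key 0) && ! PySem.Set.contains st.1 key
        then (PySem.Set.add st.1 key, st.2 ++ [key]) else st) st)
    ((PySem.Set.empty : PySem.Set String), ([] : List String))
  -- second pass: the remaining (unique-to-one-response) keys
  let st2 := responses.foldl (fun st response =>
      (pvRespKeys response).foldl (fun (st : PySem.Set String × List String) key =>
        if decide (counts.getD key 0 < 2) && ! PySem.Set.contains st.1 key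
        then (PySem.Set.add st.1 key, st.2 ++ [key]) else st) st) st1
  st2.2.filter (fun key => ! pvFieldsToExclude.contains key)

-- ===== PRECONDITION & SPEC =====
def Spec_get_response_keys (responses : List (List (String × String))) (out : List String) : Prop := out = get_response_keys_alt responses
instance (responses : List (List (String × String))) (out : List String) : Decidable (Spec_get_response_keys responses out) := by unfold Spec_get_response_keys; infer_instance

-- ===== CLAIM (what is proved, stated in full; the proofs are below) =====
def Claim_equal_get_response_keys : Prop := ∀ (responses : List (List (String × String))), Dom_get_response_keys responses → Spec_get_response_keys responses (get_response_keys responses)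

-- ===== LEMMAS AND PROOFS =====

-- the dedup step both programs perform, abstracted over the admission predicate
def pvStep (p : String → Bool) (st : PySem.Set String × List String) (k : String) :
    PySem.Set String × List String :=
  if p k && ! PySem.Set.contains st.1 k then (PySem.Set.add st.1 k, st.2 ++ [k]) else st

-- folding pvStep p over l is folding the unconditional step over l.filter p
theorem pvStep_filter (p : String → Bool) (l : List String)
    (st : PySem.Set String × List String) :
    l.foldl (pvStep p) st = (l.filter p).foldl (pvStep (fun _ => true)) st := by
  induction l generalizing st with
  | nil => rfl
  | cons x rest ih =>
      by_cases hx : p x = true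
      · simp [hx, List.foldl_cons, ih, pvStep]
      · have hx' : p x = false := by simpa using hx
        simp [hx', List.foldl_cons, ih, pvStep]

-- the unconditional fold computes A's unique_keys loop
theorem pvStep_uniqueKeys (l : List String) (seen : PySem.Set String) (res : List String) :
    (l.foldl (pvStep (fun _ => true)) (seen, res)).2 = res ++ pvUniqueKeysLoop seen l := by
  induction l generalizing seen res with
  | nil => simp [pvUniqueKeysLoop]
  | cons x rest ih =>
      by_cases hx : x ∈ seen
      · simp [List.foldl_cons, pvStep, hx, pvUniqueKeysLoop, ih]
      · simp [List.foldl_cons, pvStep, hx, pvUniqueKeysLoop, ih]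

-- A's 'common_keys' membership: a key lies in some pairwise intersection
-- iff it occurs at least twice in the flattened (per-response distinct) key lists
theorem pvCombos2_mem (kss : List (List String)) (h : ∀ l ∈ kss, l.Nodup) (k : String) :
    (∃ p ∈ pvCombos2 kss, k ∈ p.1 ∧ k ∈ p.2) ↔ 2 ≤ kss.flatten.count k := by
  induction kss with
  | nil => simp [pvCombos2]
  | cons x xs ih =>
      have hx : x.Nodup := h x (by simp)
      have ih' := ih (fun l hl => h l (by simp [hl]))
      have hmem : 0 < xs.flatten.count k ↔ ∃ y ∈ xs, k ∈ y := by
        rw [List.count_pos_iff, List.mem_flatten]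
      constructor
      · rintro ⟨p, hp, hk1, hk2⟩
        rw [pvCombos2, List.mem_append] at hp
        rcases hp with hp | hp
        · obtain ⟨y, hy, rfl⟩ := List.mem_map.mp hp
          have hcx : x.count k = 1 := List.count_eq_one_of_mem hx hk1
          have hcy : 0 < xs.flatten.count k := hmem.mpr ⟨y, hy, hk2⟩
          simp only [List.flatten_cons, List.count_append]
          omega
        · have := ih'.mp ⟨p, hp, hk1, hk2⟩
          simp only [List.flatten_cons, List.count_append]
          omega
      · intro h2
        simp only [List.flatten_cons, List.count_append] at h2
        by_cases hkx : k ∈ x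
        · have hcx : x.count k = 1 := List.count_eq_one_of_mem hx hkx
          by_cases hrest : 0 < xs.flatten.count k
          · obtain ⟨y, hy, hky⟩ := hmem.mp hrest
            refine ⟨(x, y), ?_, hkx, hky⟩
            rw [pvCombos2, List.mem_append]
            exact Or.inl (List.mem_map.mpr ⟨y, hy, rfl⟩)
          · omega
        · have hcx : x.count k = 0 := List.count_eq_zero.mpr hkx
          obtain ⟨p, hp, h1, h2'⟩ := ih'.mpr (by omega)
          refine ⟨p, ?_, h1, h2'⟩
          rw [pvCombos2, List.mem_append]
          exact Or.inr hp

-- B's counts dictionary counts occurrences in the flattened key lists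
theorem pvCounts_getD (flat : List String) (k : String) :
    (flat.foldl (fun d key => d.insert key (d.getD key 0 + 1))
      (PySem.Dict.empty : PySem.Dict String Int)).getD k 0 = (flat.count k : Int) := by
  rw [PySem.Dict.getD_foldl_insert_add_one]
  simp

-- each response's key list is duplicate-free
theorem pvRespKeys_nodup (r : List (String × String)) : (pvRespKeys r).Nodup :=
  PySem.Set.nodup_ofList _

-- nested per-response folds are one fold over the flattened key lists
theorem pvFoldl_flatten {α : Type} (responses : List (List (String × String)))
    (f : α → String → α) (init : α) :
    responses.foldl (fun a response => (pvRespKeys response).foldl f a) init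
      = (responses.map pvRespKeys).flatten.foldl f init := by
  rw [List.foldl_flatten, List.foldl_map]

-- the two filter predicates agree pointwise on the flattened key lists
theorem pvPred_eq (responses : List (List (String × String))) (k : String) :
    PySem.Set.contains
        (PySem.Set.ofList (pvFlattenArray
          ((pvCombos2 (responses.map (fun response =>
              PySem.Set.ofList (pvRespKeys response)))).map
            (fun p => PySem.Set.inter p.1 p.2))))
        k
      = decide (2 ≤ ((responses.map pvRespKeys).flatten.count k : Int)) := by
  have hmap : responses.map (fun response => PySem.Set.ofList (pvRespKeys response))
      = responses.map pvRespKeys := by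
    simp [pvRespKeys, PySem.Set.ofList_ofList]
  rw [hmap]
  have hiff : (k ∈ PySem.Set.ofList (pvFlattenArray
        ((pvCombos2 (responses.map pvRespKeys)).map (fun p => PySem.Set.inter p.1 p.2))))
      ↔ 2 ≤ (responses.map pvRespKeys).flatten.count k := by
    rw [PySem.Set.mem_ofList]
    unfold pvFlattenArray
    rw [List.mem_flatten]
    constructor
    · rintro ⟨l, hl, hk⟩
      obtain ⟨p, hp, rfl⟩ := List.mem_map.mp hl
      have hnd : ∀ l ∈ responses.map pvRespKeys, l.Nodup := by
        intro l hl'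
        obtain ⟨r, _, rfl⟩ := List.mem_map.mp hl'
        exact pvRespKeys_nodup r
      exact (pvCombos2_mem _ hnd k).mp ⟨p, hp, (PySem.Set.mem_inter p.1 p.2 k).mp hk⟩
    · intro h2
      have hnd : ∀ l ∈ responses.map pvRespKeys, l.Nodup := by
        intro l hl'
        obtain ⟨r, _, rfl⟩ := List.mem_map.mp hl'
        exact pvRespKeys_nodup r
      obtain ⟨p, hp, h1, h2'⟩ := (pvCombos2_mem _ hnd k).mpr h2
      exact ⟨PySem.Set.inter p.1 p.2, List.mem_map.mpr ⟨p, hp, rfl⟩,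
        (PySem.Set.mem_inter p.1 p.2 k).mpr ⟨h1, h2'⟩⟩
  by_cases hk : 2 ≤ (responses.map pvRespKeys).flatten.count k
  · have h2 : (2 : Int) ≤ ((responses.map pvRespKeys).flatten.count k : Int) := by
      exact_mod_cast hk
    rw [(PySem.Set.contains_iff _ k).mpr (hiff.mpr hk)]
    simp [h2]
  · have h2 : ¬ (2 : Int) ≤ ((responses.map pvRespKeys).flatten.count k : Int) := by
      exact_mod_cast hk
    have hnm : k ∉ PySem.Set.ofList (pvFlattenArray
        ((pvCombos2 (responses.map pvRespKeys)).map (fun p => PySem.Set.inter p.1 p.2))) :=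
      fun hm => hk (hiff.mp hm)
    have hc : PySem.Set.contains (PySem.Set.ofList (pvFlattenArray
        ((pvCombos2 (responses.map pvRespKeys)).map (fun p => PySem.Set.inter p.1 p.2)))) k
        = false := by
      cases hcc : PySem.Set.contains (PySem.Set.ofList (pvFlattenArray
          ((pvCombos2 (responses.map pvRespKeys)).map
            (fun p => PySem.Set.inter p.1 p.2)))) k
      · rfl
      · exact absurd ((PySem.Set.contains_iff _ k).mp hcc) hnm
    rw [hc]
    simp [h2]

-- ===== VERDICT (by name: the statement is the Claim_ definition above) =====
theorem get_response_keys_spec : Claim_equal_get_response_keys := by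
  intro responses _
  show get_response_keys responses = get_response_keys_alt responses
  unfold get_response_keys get_response_keys_alt
  simp only []
  set flat := (responses.map pvRespKeys).flatten with hflat
  have hcounts : ∀ k, (responses.foldl (fun d response =>
        (pvRespKeys response).foldl (fun d key => d.insert key (d.getD key 0 + 1)) d)
      (PySem.Dict.empty : PySem.Dict String Int)).getD k 0 = (flat.count k : Int) := by
    intro k
    rw [pvFoldl_flatten, ← hflat]
    exact pvCounts_getD flat k
  -- B's two step lambdas are pvStep with count-based predicates
  have hstep1 : (fun (st : PySem.Set String × List String) key =>
      if decide (2 ≤ ((responses.foldl (fun d response =>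
            (pvRespKeys response).foldl (fun d key => d.insert key (d.getD key 0 + 1)) d)
          (PySem.Dict.empty : PySem.Dict String Int)).getD key 0)) &&
          ! PySem.Set.contains st.1 key
      then (PySem.Set.add st.1 key, st.2 ++ [key]) else st)
      = pvStep (fun key => decide (2 ≤ (flat.count key : Int))) := by
    funext st key
    rw [pvStep, hcounts key]
  have hstep2 : (fun (st : PySem.Set String × List String) key =>
      if decide (((responses.foldl (fun d response =>
            (pvRespKeys response).foldl (fun d key => d.insert key (d.getD key 0 + 1)) d)
          (PySem.Dict.empty : PySem.Dict String Int)).getD key 0) < 2) &&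
          ! PySem.Set.contains st.1 key
      then (PySem.Set.add st.1 key, st.2 ++ [key]) else st)
      = pvStep (fun key => decide ((flat.count key : Int) < 2)) := by
    funext st key
    rw [pvStep, hcounts key]
  rw [hstep1, hstep2, pvFoldl_flatten, pvFoldl_flatten, ← hflat,
      pvStep_filter (fun key => decide (2 ≤ (flat.count key : Int))) flat,
      pvStep_filter (fun key => decide ((flat.count key : Int) < 2)) flat]
  -- A's two flattened filter blocks are the same filtered lists
  have hpred := pvPred_eq responses
  have hA1 : pvFlattenArray (responses.map (fun response =>
      (pvRespKeys response).filter (fun key => PySem.Set.contains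
        (PySem.Set.ofList (pvFlattenArray
          ((pvCombos2 (responses.map (fun response =>
              PySem.Set.ofList (pvRespKeys response)))).map
            (fun p => PySem.Set.inter p.1 p.2)))) key)))
      = flat.filter (fun key => decide (2 ≤ (flat.count key : Int))) := by
    unfold pvFlattenArray
    rw [hflat, List.filter_flatten, List.map_map]
    congr 1
    apply List.map_congr_left
    intro r _
    apply List.filter_congr
    intro k _
    have h := hpred k
    simp only [pvFlattenArray] at h
    rw [h, ← hflat]
  have hA2 : pvFlattenArray (responses.map (fun response =>
      (pvRespKeys response).filter (fun key => ! PySem.Set.contains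
        (PySem.Set.ofList (pvFlattenArray
          ((pvCombos2 (responses.map (fun response =>
              PySem.Set.ofList (pvRespKeys response)))).map
            (fun p => PySem.Set.inter p.1 p.2)))) key)))
      = flat.filter (fun key => decide ((flat.count key : Int) < 2)) := by
    unfold pvFlattenArray
    rw [hflat, List.filter_flatten, List.map_map]
    congr 1
    apply List.map_congr_left
    intro r _
    apply List.filter_congr
    intro k _
    have h := hpred k
    simp only [pvFlattenArray] at h
    rw [h, ← hflat]
    by_cases h2 : 2 ≤ ((flat.count k : Int))
    · simp [h2, not_lt.mpr h2]
    · simp [h2, lt_of_not_ge h2]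
  rw [hA1, hA2]
  congr 1
  unfold pvUniqueKeys
  rw [← List.foldl_append, pvStep_uniqueKeys]
  rfl
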